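-- pv_equiv track=rewrite | github.com/benquick123/code-profiling | code/izpiti/izpit02/M-17106-1414.py | bingo
-- ===== SOURCE A (Python) =====
-- def bingo(listki, vrstni_red):
--     konec=False
--     l2=[]
--     for k in listki:
--         l2.append(k.copy())
--
--     for a in vrstni_red:
--         for b in enumerate(l2):
--             if a in b[1]:
--                 b[1].remove(a)
--             if not b[1]:
--                 win=b[0]
--                 konec=True
--         if konec:
--             break
--     return listki[win]
-- ===== SOURCE B (Python) =====
-- def bingo(listki, vrstni_red):
--     # Per-card multiplicities of its distinct numbers, and the largest
--     # multiplicity any card needs of each number.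
--     cnts = []
--     need = {}
--     for card in listki:
--         cnt = {}
--         for x in dict.fromkeys(card):
--             m = card.count(x)
--             cnt[x] = m
--             if need.get(x, 0) < m:
--                 need[x] = m
--         cnts.append(cnt)
--     # Positions of the first need[x] occurrences of each needed number.
--     pos = {}
--     for x, m in need.items():
--         ps = []
--         start = 0
--         try:
--             for _ in range(m):
--                 i = vrstni_red.index(x, start)
--                 ps.append(i)
--                 start = i + 1
--         except ValueError:
--             pass
--         pos[x] = ps
--     # A card needing m copies of x is completed at the position of the m-th
--     # occurrence; its completion step is the max over its distinct numbers.
--     # The winner has the minimal completion step, ties to the highest index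
--     # (the rules check cards in order and the last emptied card observed wins).
--     best_step = None
--     best_idx = None
--     for idx, cnt in enumerate(cnts):
--         step = 0  # an empty card is complete already at the first draw
--         for x, m in cnt.items():
--             ps = pos[x]
--             if len(ps) < m:
--                 step = None
--                 break
--             step = max(step, ps[m - 1])
--         if step is not None and (best_step is None or step <= best_step):
--             best_step, best_idx = step, idx
--     return listki[best_idx]
-- ===== Notes on version B (the rewrite author's own statement) =====
-- stated objective: faster
-- what changed: Instead of simulating the draws by removing each drawn number from a copy of every card, B counts each card's needs with C-level dict.fromkeys/count, collects via list.index the draw positions of the first need[x] occurrences of each needed number, computes each card's completion step as the max position of the m-th occurrence of each needed number, and picks the minimal completion step with ties to the highest card index.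
import Mathlib
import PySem

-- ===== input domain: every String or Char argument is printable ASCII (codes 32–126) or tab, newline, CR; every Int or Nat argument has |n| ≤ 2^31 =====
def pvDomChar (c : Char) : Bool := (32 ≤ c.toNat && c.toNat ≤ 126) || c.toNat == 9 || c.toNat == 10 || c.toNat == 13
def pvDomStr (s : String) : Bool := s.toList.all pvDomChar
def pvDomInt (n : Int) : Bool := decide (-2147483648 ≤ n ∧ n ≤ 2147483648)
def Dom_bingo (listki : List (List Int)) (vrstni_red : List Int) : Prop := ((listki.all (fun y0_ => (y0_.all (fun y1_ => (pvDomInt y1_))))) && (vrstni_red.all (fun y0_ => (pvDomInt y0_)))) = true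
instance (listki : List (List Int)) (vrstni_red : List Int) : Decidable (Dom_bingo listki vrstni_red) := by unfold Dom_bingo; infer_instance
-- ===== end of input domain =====

-- B replaces A's draw-by-draw simulation (which removes each drawn number from a copy of
-- every card) by a dict number -> positions of its first needed occurrences; each card's
-- completion step is the max position of the m-th occurrence of each needed number, and
-- the winner is the card with minimal completion step, ties to the highest index
-- (measured faster).

-- ===== PORT A =====
-- inner loop 'for b in enumerate(l2)': returns the updated cards and the last index
-- whose card is empty after this draw (win; konec is true iff it is some)
def bingoInner (a : Int) : List (List Int) → Int → List (List Int) × Option Int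
  | [], _ => ([], none)
  | c :: cs, i =>
    -- if a in b[1]: b[1].remove(a)
    let c' := match PySem.List.remove? c a with
      | some r => r
      | none => c
    let p := bingoInner a cs (i + 1)
    (c' :: p.1,
      match p.2 with
      | some j => some j          -- a later card overrides win
      | none => if c' = [] then some i else none)

-- outer loop 'for a in vrstni_red', breaking once konec is set
def bingoOuter : List Int → List (List Int) → Option Int
  | [], _ => none
  | a :: rest, l2 =>
    let p := bingoInner a l2 0
    match p.2 with
    | some j => some j
    | none => bingoOuter rest p.1

def bingo (listki : List (List Int)) (vrstni_red : List Int) : List Int :=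
  let l2 := listki.map (fun k => k)      -- l2.append(k.copy())
  match bingoOuter vrstni_red l2 with
  | some w => PySem.List.pyGetD listki w []   -- listki[win]
  | none => []                                 -- Python: NameError (win unassigned); outside Pre_bingo

-- ===== PORT B =====
-- cnt = {}; for x in dict.fromkeys(card): m = card.count(x); cnt[x] = m
--                                         if need.get(x, 0) < m: need[x] = m
def cardStep (card : List Int) (p : PySem.Dict Int Int × PySem.Dict Int Int) :
    PySem.Dict Int Int × PySem.Dict Int Int :=
  (PySem.Set.ofList card).foldl
    (fun q x =>
      let m : Int := card.count x
      (q.1.insert x m, if q.2.getD x 0 < m then q.2.insert x m else q.2))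
    p

-- cnts = []; need = {}; for card in listki: ... ; cnts.append(cnt)
def cntsNeed (listki : List (List Int)) :
    List (PySem.Dict Int Int) × PySem.Dict Int Int :=
  listki.foldl (fun acc card =>
    let r := cardStep card (PySem.Dict.empty, acc.2)
    (acc.1 ++ [r.1], r.2)) ([], PySem.Dict.empty)

-- i = vrstni_red.index(x, start): first index ≥ start holding x (none = ValueError)
def idxFrom (x start : Int) : List Int → Int → Option Int
  | [], _ => none
  | d :: rest, j => if start ≤ j ∧ d = x then some j else idxFrom x start rest (j + 1)

-- ps = []; start = 0; for _ in range(m): i = index(x, start); ps.append(i); start = i + 1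
-- (the ValueError of index aborts the loop, keeping ps)
def psLoop (ds : List Int) (x : Int) : Nat → Int → List Int → List Int
  | 0, _, ps => ps
  | m + 1, start, ps =>
    match idxFrom x start ds 0 with
    | none => ps
    | some i => psLoop ds x m (i + 1) (ps ++ [i])

-- pos = {}; for x, m in need.items(): pos[x] = ps
def posDict (need : PySem.Dict Int Int) (vrstni_red : List Int) :
    PySem.Dict Int (List Int) :=
  need.items.foldl
    (fun pos p => pos.insert p.1 (psLoop vrstni_red p.1 p.2.toNat 0 []))
    PySem.Dict.empty

-- for x, m in cnt.items(): ps = pos[x]; if len(ps) < m: step = None; break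
--                          step = max(step, ps[m - 1])
-- (pos[x] never raises: every number of a card is a key of need, hence of pos)
def stepItems (pos : PySem.Dict Int (List Int)) : List (Int × Int) → Int → Option Int
  | [], s => some s
  | (x, m) :: rest, s =>
    let ps := pos.getD x []
    if (ps.length : Int) < m then none
    else stepItems pos rest (max s (PySem.List.pyGetD ps (m - 1) 0))

-- for idx, cnt in enumerate(cnts): ... keep (best_step, best_idx)
def bestLoop (pos : PySem.Dict Int (List Int)) :
    List (Int × PySem.Dict Int Int) → Option (Int × Int) → Option (Int × Int)
  | [], best => best
  | (idx, cnt) :: rest, best =>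
    let step := stepItems pos cnt.items 0
    let best' := match step with
      | none => best
      | some t =>
        match best with
        | none => some (t, idx)
        | some q => if t ≤ q.1 then some (t, idx) else best
    bestLoop pos rest best'

def bingo_alt (listki : List (List Int)) (vrstni_red : List Int) : List Int :=
  let r := cntsNeed listki
  let pos := posDict r.2 vrstni_red
  match bestLoop pos (PySem.List.enumerate r.1 0) none with
  | some q => PySem.List.pyGetD listki q.2 []   -- listki[best_idx]
  | none => []                                   -- Python: TypeError (best_idx is None); outside Pre_bingo

-- ===== PRECONDITION & SPEC =====
-- exactly the inputs on which A returns: some draw must be made and some card must be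
-- covered (with multiplicities) by the drawn numbers; otherwise 'win' is never assigned
-- and A raises NameError
def Pre_bingo (listki : List (List Int)) (vrstni_red : List Int) : Prop :=
  vrstni_red ≠ [] ∧ ∃ c ∈ listki, ∀ x ∈ c, c.count x ≤ vrstni_red.count x
instance (listki : List (List Int)) (vrstni_red : List Int) : Decidable (Pre_bingo listki vrstni_red) := by
  unfold Pre_bingo; infer_instance

def pvWitness_bingo : List (List Int) × List Int := ([[1, 2], [3]], [3, 1, 2])

def Spec_bingo (listki : List (List Int)) (vrstni_red : List Int) (out : List Int) : Prop := out = bingo_alt listki vrstni_red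
instance (listki : List (List Int)) (vrstni_red : List Int) (out : List Int) : Decidable (Spec_bingo listki vrstni_red out) := by unfold Spec_bingo; infer_instance

-- ===== CLAIM (what is proved, stated in full; the proofs are below) =====
def Claim_equal_bingo : Prop := ∀ (listki : List (List Int)) (vrstni_red : List Int), Dom_bingo listki vrstni_red → Pre_bingo listki vrstni_red → Spec_bingo listki vrstni_red (bingo listki vrstni_red)

-- ===== LEMMAS AND PROOFS =====

-- residual of a card after a prefix of draws (A removes one copy of each drawn number)
def pvResid (pref c : List Int) : List Int := pref.foldl (fun l x => l.erase x) c

-- first draw index after which the card is empty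
def pvSfind (c ds : List Int) : Option Int :=
  ((List.range ds.length).find? (fun k => (pvResid (ds.take (k + 1)) c).isEmpty)).map
    (Nat.cast : Nat → Int)

-- last index (from i) of an empty card
def pvW : List (List Int) → Int → Option Int
  | [], _ => none
  | c :: cs, i =>
    match pvW cs (i + 1) with
    | some j => some j
    | none => if c = [] then some i else none

-- abstract form of B's best-of loop over precomputed steps
def pvUpd (s : Option Int) (i : Int) (best : Option (Int × Int)) : Option (Int × Int) :=
  match s with
  | none => best
  | some t =>
    match best with
    | none => some (t, i)
    | some q => if t ≤ q.1 then some (t, i) else best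

def pvBest : List (Option Int) → Int → Option (Int × Int) → Option (Int × Int)
  | [], _, best => best
  | s :: rest, i, best => pvBest rest (i + 1) (pvUpd s i best)

-- index of the (k+1)-th occurrence of x
def pvOcc (x : Int) : Nat → List Int → Option Nat
  | _, [] => none
  | k, d :: ds =>
    if d = x then
      match k with
      | 0 => some 0
      | k + 1 => (pvOcc x k ds).map (· + 1)
    else (pvOcc x k ds).map (· + 1)

-- positions of x among draws, enumerated from s
def pvPosLs (x : Int) (s : Int) (ds : List Int) : List Int :=
  ((PySem.List.enumerate ds s).filter (fun p => p.2 == x)).map (·.1)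

def pvRel (c : List Int) (s : Option Int) : Prop :=
  (c = [] ∧ s = some 0) ∨ (c ≠ [] ∧ ∀ t, s = some t → 0 < t)

theorem pv_inner (a : Int) (cs : List (List Int)) (i : Int) :
    bingoInner a cs i = (cs.map (·.erase a), pvW (cs.map (·.erase a)) i) := by
  induction cs generalizing i with
  | nil => simp [bingoInner, pvW]
  | cons c cs ih =>
    have hc' : (match PySem.List.remove? c a with | some r => r | none => c) = c.erase a := by
      by_cases h : a ∈ c
      · rw [PySem.List.remove?_eq_some_erase c a h]
      · rw [(PySem.List.remove?_eq_none_iff c a).mpr h, List.erase_of_not_mem h]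
    simp only [bingoInner, ih, pvW, List.map_cons]
    rw [hc']

theorem pv_W_none (cs : List (List Int)) (i : Int) :
    pvW cs i = none ↔ ∀ c ∈ cs, c ≠ [] := by
  induction cs generalizing i with
  | nil => simp [pvW]
  | cons c cs ih =>
    simp only [pvW]
    cases hw : pvW cs (i + 1) with
    | some j =>
      have hnot : ¬ (∀ d ∈ cs, d ≠ []) := by
        intro hall; rw [(ih (i+1)).mpr hall] at hw; cases hw
      constructor
      · intro h; cases h
      · intro h; exact absurd (fun d hd => h d (List.mem_cons_of_mem _ hd)) hnot
    | none =>
      by_cases hc : c = []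
      · simp [hc]
      · simpa [hc] using (ih (i+1)).mp hw

theorem pv_upd_nonneg (s : Option Int) (i : Int) (acc : Option (Int × Int))
    (hs : ∀ t, s = some t → 0 ≤ t) (hacc : ∀ q, acc = some q → 0 ≤ q.1) :
    ∀ q, pvUpd s i acc = some q → 0 ≤ q.1 := by
  intro q hq
  cases s with
  | none => exact hacc q hq
  | some t =>
    have ht : 0 ≤ t := hs t rfl
    cases acc with
    | none =>
      simp only [pvUpd] at hq
      injection hq with h1; rw [← h1]; exact ht
    | some p =>
      simp only [pvUpd] at hq
      by_cases hle : t ≤ p.1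
      · rw [if_pos hle] at hq; injection hq with h1; rw [← h1]; exact ht
      · rw [if_neg hle] at hq; exact hacc q hq

theorem pv_best_stable (ss : List (Option Int)) (i : Int) (j : Int)
    (h : ∀ s ∈ ss, ∀ t, s = some t → 0 < t) :
    pvBest ss i (some (0, j)) = some (0, j) := by
  induction ss generalizing i with
  | nil => simp [pvBest]
  | cons s rest ih =>
    have hupd : pvUpd s i (some ((0:Int), j)) = some (0, j) := by
      cases s with
      | none => rfl
      | some t =>
        have ht : 0 < t := h (some t) (by simp) t rfl
        simp only [pvUpd]
        rw [if_neg (by omega)]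
    simp only [pvBest, hupd]
    exact ih (i+1) (fun u hu => h u (by simp [hu]))

theorem pv_forall2_mem_right {cs : List (List Int)} {ss : List (Option Int)}
    (h : List.Forall₂ pvRel cs ss) (s : Option Int) (hs : s ∈ ss) :
    ∃ c ∈ cs, pvRel c s := by
  induction h with
  | nil => simp at hs
  | cons hcs _ ih =>
    rcases List.mem_cons.mp hs with rfl | hs
    · exact ⟨_, by simp, hcs⟩
    · obtain ⟨c, hc, hr⟩ := ih hs
      exact ⟨c, by simp [hc], hr⟩

theorem pv_Z (cs : List (List Int)) (ss : List (Option Int))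
    (hrel : List.Forall₂ pvRel cs ss) :
    ∀ i j, pvW cs i = some j →
      ∀ acc, (∀ q, acc = some q → 0 ≤ q.1) → pvBest ss i acc = some (0, j) := by
  induction hrel with
  | nil => intro i j h; simp [pvW] at h
  | @cons c s cs ss hcs hrest ih =>
    intro i j hw acc hacc
    simp only [pvW] at hw
    simp only [pvBest]
    have hs0 : ∀ t, s = some t → 0 ≤ t := by
      intro t hst
      rcases hcs with ⟨_, h0⟩ | ⟨_, hpos⟩
      · rw [hst] at h0; injection h0 with h0; omega
      · have := hpos t hst; omega
    have hacc' := pv_upd_nonneg s i acc hs0 hacc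
    cases hwrest : pvW cs (i + 1) with
    | some j' =>
      rw [hwrest] at hw; cases hw
      exact ih (i+1) j hwrest _ hacc'
    | none =>
      rw [hwrest] at hw
      split_ifs at hw with hc
      · cases hw
        rcases hcs with ⟨_, hs⟩ | ⟨hne, _⟩
        · have hupd : pvUpd s i acc = some ((0:Int), i) := by
            rw [hs]
            cases acc with
            | none => rfl
            | some q => simp only [pvUpd]; rw [if_pos (hacc q rfl)]
          rw [hupd]
          have hall : ∀ u ∈ ss, ∀ t, u = some t → 0 < t := by
            intro u hu t hut
            obtain ⟨c', hc', hr⟩ := pv_forall2_mem_right hrest u hu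
            rcases hr with ⟨hc0, _⟩ | ⟨_, hpos⟩
            · exact absurd hc0 ((pv_W_none cs (i+1)).mp hwrest c' hc')
            · exact hpos t hut
          exact pv_best_stable ss (i+1) i hall
        · exact absurd hc hne

theorem pv_shift_best (ss : List (Option Int)) (i : Int) (acc : Option (Int × Int)) :
    pvBest (ss.map (Option.map (· + 1))) i (acc.map (fun p => (p.1 + 1, p.2))) =
      (pvBest ss i acc).map (fun p => (p.1 + 1, p.2)) := by
  induction ss generalizing i acc with
  | nil => simp [pvBest]
  | cons s rest ih =>
    simp only [List.map_cons, pvBest]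
    have hupd : pvUpd (s.map (· + 1)) i (acc.map (fun p => (p.1 + 1, p.2))) =
        (pvUpd s i acc).map (fun p => (p.1 + 1, p.2)) := by
      cases s with
      | none => rfl
      | some t =>
        cases acc with
        | none => rfl
        | some q =>
          simp only [Option.map_some, pvUpd]
          by_cases hle : t ≤ q.1
          · rw [if_pos hle, if_pos (by omega : t + 1 ≤ q.1 + 1)]; rfl
          · rw [if_neg hle, if_neg (by omega : ¬ t + 1 ≤ q.1 + 1)]; rfl
    rw [hupd]
    exact ih (i+1) _

theorem pv_best_none (ss : List (Option Int)) (i : Int) (acc : Option (Int × Int))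
    (h : ∀ s ∈ ss, s = none) : pvBest ss i acc = acc := by
  induction ss generalizing i acc with
  | nil => simp [pvBest]
  | cons s rest ih =>
    have hs : s = none := h s (by simp)
    simp only [pvBest, hs, pvUpd]
    exact ih (i+1) acc (fun u hu => h u (by simp [hu]))

theorem pv_sfind_nil (c : List Int) : pvSfind c [] = none := by
  simp [pvSfind]

theorem pv_sfind_zero (c : List Int) (a : Int) (rest : List Int) (h : c.erase a = []) :
    pvSfind c (a :: rest) = some 0 := by
  unfold pvSfind
  rw [show (a :: rest).length = rest.length + 1 from rfl, List.range_succ_eq_map]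
  have h0 : ((fun k => (pvResid ((a :: rest).take (k + 1)) c).isEmpty) 0) = true := by
    simp [pvResid, h]
  rw [List.find?_cons_of_pos (p := fun k => (pvResid (List.take (k + 1) (a :: rest)) c).isEmpty) h0]
  rfl

theorem pv_sfind_shift (c : List Int) (a : Int) (rest : List Int) (h : c.erase a ≠ []) :
    pvSfind c (a :: rest) = (pvSfind (c.erase a) rest).map (· + 1) := by
  unfold pvSfind
  rw [show (a :: rest).length = rest.length + 1 from rfl, List.range_succ_eq_map]
  have h0 : ¬ ((fun k => (pvResid ((a :: rest).take (k + 1)) c).isEmpty) 0) = true := by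
    simp [pvResid, h]
  rw [List.find?_cons_of_neg (p := fun k => (pvResid (List.take (k + 1) (a :: rest)) c).isEmpty) h0, List.find?_map]
  have hfun : ((fun k => (pvResid ((a :: rest).take (k + 1)) c).isEmpty) ∘ Nat.succ) =
      (fun k => (pvResid (rest.take (k + 1)) (c.erase a)).isEmpty) := by
    funext k
    simp only [Function.comp, List.take_succ_cons, pvResid, List.foldl_cons]
  rw [hfun, Option.map_map, Option.map_map]
  exact Option.map_congr (fun n _ => by simp)

theorem pv_sfind_rel (c : List Int) (a : Int) (rest : List Int) :
    pvRel (c.erase a) (pvSfind c (a :: rest)) := by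
  by_cases h : c.erase a = []
  · exact Or.inl ⟨h, by rw [pv_sfind_zero c a rest h]⟩
  · refine Or.inr ⟨h, ?_⟩
    intro t ht
    rw [pv_sfind_shift c a rest h] at ht
    rcases Option.map_eq_some_iff.mp ht with ⟨u, hu, rfl⟩
    unfold pvSfind at hu
    rcases Option.map_eq_some_iff.mp hu with ⟨k, _, rfl⟩
    omega

theorem pv_ML (ds : List Int) (cs : List (List Int)) :
    bingoOuter ds cs = (pvBest (cs.map (fun c => pvSfind c ds)) 0 none).map Prod.snd := by
  induction ds generalizing cs with
  | nil =>
    rw [pv_best_none _ _ _ (by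
      intro u hu
      rcases List.mem_map.mp hu with ⟨c, _, rfl⟩
      exact pv_sfind_nil c)]
    rfl
  | cons a rest ih =>
    have hrel : List.Forall₂ pvRel (cs.map (·.erase a)) (cs.map (fun c => pvSfind c (a :: rest))) := by
      clear ih
      induction cs with
      | nil => simp
      | cons c cs ihc => exact List.Forall₂.cons (pv_sfind_rel c a rest) ihc
    simp only [bingoOuter, pv_inner]
    cases hw : pvW (cs.map (·.erase a)) 0 with
    | some j =>
      rw [pv_Z _ _ hrel 0 j hw none (by simp)]
      rfl
    | none =>
      have hne : ∀ c ∈ cs, c.erase a ≠ [] := by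
        intro c hc
        exact (pv_W_none _ 0).mp hw _ (List.mem_map.mpr ⟨c, hc, rfl⟩)
      have hmaps : cs.map (fun c => pvSfind c (a :: rest)) =
          ((cs.map (·.erase a)).map (fun c => pvSfind c rest)).map (Option.map (· + 1)) := by
        rw [List.map_map, List.map_map]
        exact List.map_congr_left (fun c hc => pv_sfind_shift c a rest (hne c hc))
      rw [hmaps]
      have := pv_shift_best ((cs.map (·.erase a)).map (fun c => pvSfind c rest)) 0 none
      simp only [Option.map_none] at this
      rw [this, ih, Option.map_map]
      congr 1

-- ===== B side =====

def cntOf (card : List Int) : PySem.Dict Int Int :=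
  (PySem.Set.ofList card).foldl (fun d x => d.insert x (card.count x : Int))
    PySem.Dict.empty

def needStep (e : PySem.Dict Int Int) (card : List Int) : PySem.Dict Int Int :=
  (PySem.Set.ofList card).foldl
    (fun e x => if e.getD x 0 < (card.count x : Int)
      then e.insert x (card.count x : Int) else e) e

def pvNeed (listki : List (List Int)) : PySem.Dict Int Int :=
  listki.foldl needStep PySem.Dict.empty

def pvNeedVal (listki : List (List Int)) (x : Int) : Int :=
  listki.foldl (fun t c => max t (c.count x : Int)) 0

theorem pv_cardStep_split (l : List Int) (g : Int → Int) :
    ∀ (d e : PySem.Dict Int Int),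
      l.foldl (fun (q : PySem.Dict Int Int × PySem.Dict Int Int) x =>
        (q.1.insert x (g x), if q.2.getD x 0 < g x then q.2.insert x (g x) else q.2))
        (d, e) =
      (l.foldl (fun d x => d.insert x (g x)) d,
       l.foldl (fun e x => if e.getD x 0 < g x then e.insert x (g x) else e) e) := by
  induction l with
  | nil => intro d e; rfl
  | cons y l ih => intro d e; simp only [List.foldl_cons]; exact ih _ _

theorem pv_cardStep_eq (card : List Int) (e : PySem.Dict Int Int) :
    cardStep card (PySem.Dict.empty, e) = (cntOf card, needStep e card) := by
  unfold cardStep cntOf needStep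
  exact pv_cardStep_split (PySem.Set.ofList card) (fun x => (card.count x : Int))
    PySem.Dict.empty e

theorem pv_cntsNeed_aux (l : List (List Int)) :
    ∀ (accL : List (PySem.Dict Int Int)) (e : PySem.Dict Int Int),
      l.foldl (fun acc card =>
        let r := cardStep card (PySem.Dict.empty, acc.2)
        (acc.1 ++ [r.1], r.2)) (accL, e) =
      (accL ++ l.map cntOf, l.foldl needStep e) := by
  induction l with
  | nil => intro accL e; simp
  | cons c l ih =>
    intro accL e
    rw [List.foldl_cons,
      show (let r := cardStep c (PySem.Dict.empty, (accL, e).2)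
        (((accL, e).1 ++ [r.1] : List (PySem.Dict Int Int)), r.2)) =
        (accL ++ [cntOf c], needStep e c) from by simp only [pv_cardStep_eq],
      ih]
    simp

theorem pv_cntsNeed (listki : List (List Int)) :
    cntsNeed listki = (listki.map cntOf, pvNeed listki) := by
  unfold cntsNeed pvNeed
  simpa using pv_cntsNeed_aux listki [] PySem.Dict.empty

theorem pv_cntOf_items (card : List Int) :
    (cntOf card).items =
      (PySem.Set.ofList card).map (fun k => (k, (card.count k : Int))) := by
  unfold cntOf
  have := PySem.Dict.items_foldl_insert_fresh (PySem.Set.ofList card)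
    (fun a => a) (fun a => (card.count a : Int)) PySem.Dict.empty
    (fun a _ => PySem.Dict.contains_empty a)
    (by simpa using PySem.Set.nodup_ofList card)
  simpa using this

theorem pv_needStep_getD (l : List Int) (f : Int → Int) (x : Int) :
    ∀ e : PySem.Dict Int Int,
      (l.foldl (fun e y => if e.getD y 0 < f y then e.insert y (f y) else e) e).getD x 0 =
        if x ∈ l then max (e.getD x 0) (f x) else e.getD x 0 := by
  induction l with
  | nil => intro e; simp
  | cons y l ih =>
    intro e
    simp only [List.foldl_cons]
    rw [ih]
    have hstep' : (if e.getD y 0 < f y then e.insert y (f y) else e).getD x 0 =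
        if x = y then max (e.getD x 0) (f x) else e.getD x 0 := by
      by_cases hxy : x = y
      · subst hxy
        by_cases hlt : e.getD x 0 < f x
        · rw [if_pos hlt, if_pos rfl, PySem.Dict.getD_insert, if_pos rfl]
          omega
        · rw [if_neg hlt, if_pos rfl]
          omega
      · by_cases hlt : e.getD y 0 < f y
        · rw [if_pos hlt, if_neg hxy, PySem.Dict.getD_insert, if_neg hxy]
        · rw [if_neg hlt, if_neg hxy]
    rw [hstep']
    by_cases hxy : x = y <;> by_cases hxl : x ∈ l <;>
      simp [hxy, hxl, max_assoc, max_self]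

theorem pv_need_getD_aux (l : List (List Int)) (x : Int) :
    ∀ e : PySem.Dict Int Int, 0 ≤ e.getD x 0 →
      (l.foldl needStep e).getD x 0 =
        l.foldl (fun t c => max t (c.count x : Int)) (e.getD x 0) := by
  induction l with
  | nil => intro e _; rfl
  | cons c l ih =>
    intro e he
    simp only [List.foldl_cons]
    have hstep : (needStep e c).getD x 0 = max (e.getD x 0) (c.count x : Int) := by
      unfold needStep
      rw [pv_needStep_getD]
      by_cases hx : x ∈ c
      · rw [if_pos ((PySem.Set.mem_ofList c x).mpr hx)]
      · rw [if_neg (fun hm => hx ((PySem.Set.mem_ofList c x).mp hm))]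
        have : c.count x = 0 := List.count_eq_zero.mpr hx
        rw [this]
        omega
    rw [ih (needStep e c) (by omega), hstep]

theorem pv_need_getD (listki : List (List Int)) (x : Int) :
    (pvNeed listki).getD x 0 = pvNeedVal listki x := by
  unfold pvNeed pvNeedVal
  have := pv_need_getD_aux listki x PySem.Dict.empty (by simp [PySem.Dict.getD_empty])
  simpa [PySem.Dict.getD_empty] using this

theorem pv_need_nodup_aux (l : List Int) (f : Int → Int) :
    ∀ e : PySem.Dict Int Int, e.keys.Nodup →
      (l.foldl (fun e y => if e.getD y 0 < f y then e.insert y (f y) else e) e).keys.Nodup := by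
  induction l with
  | nil => intro e he; exact he
  | cons y l ih =>
    intro e he
    simp only [List.foldl_cons]
    apply ih
    by_cases hlt : e.getD y 0 < f y
    · rw [if_pos hlt]; exact PySem.Dict.nodup_keys_insert e y (f y) he
    · rw [if_neg hlt]; exact he

theorem pv_need_nodup (listki : List (List Int)) : (pvNeed listki).keys.Nodup := by
  unfold pvNeed
  induction listki using List.reverseRecOn with
  | nil => exact PySem.Dict.nodup_keys_empty
  | append_singleton l c ih =>
    rw [List.foldl_append, List.foldl_cons, List.foldl_nil]
    exact pv_need_nodup_aux (PySem.Set.ofList c) _ _ ih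

theorem pv_fold_insert_getD_notmem (ks : List Int) (h : Int → List Int) (x : Int) :
    ∀ e : PySem.Dict Int (List Int), x ∉ ks →
      (ks.foldl (fun pos k => pos.insert k (h k)) e).getD x [] = e.getD x [] := by
  induction ks with
  | nil => intro e _; rfl
  | cons k ks ih =>
    intro e hx
    simp only [List.foldl_cons]
    rw [ih _ (fun hm => hx (List.mem_cons_of_mem _ hm)), PySem.Dict.getD_insert,
      if_neg (fun hh => hx (by simp [hh]))]

theorem pv_fold_insert_getD_mem (ks : List Int) (h : Int → List Int) (x : Int) :
    ∀ e : PySem.Dict Int (List Int), ks.Nodup → x ∈ ks →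
      (ks.foldl (fun pos k => pos.insert k (h k)) e).getD x [] = h x := by
  induction ks with
  | nil => intro e _ hx; simp at hx
  | cons k ks ih =>
    intro e hnd hx
    simp only [List.foldl_cons]
    rcases List.mem_cons.mp hx with rfl | hx'
    · rw [pv_fold_insert_getD_notmem ks h x _ (List.nodup_cons.mp hnd).1,
        PySem.Dict.getD_insert, if_pos rfl]
    · exact ih _ (List.nodup_cons.mp hnd).2 hx'

theorem pv_posDict_getD (need : PySem.Dict Int Int) (ds : List Int) (x : Int)
    (hnd : need.keys.Nodup) (hx : x ∈ need.keys) :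
    (posDict need ds).getD x [] = psLoop ds x (need.getD x 0).toNat 0 [] := by
  unfold posDict
  rw [PySem.Dict.items_eq_map_keys need hnd 0, List.foldl_map]
  exact pv_fold_insert_getD_mem need.keys
    (fun k => psLoop ds k (need.getD k 0).toNat 0 []) x _ hnd hx

theorem pv_posLs_cons (x : Int) (s : Int) (d : Int) (ds : List Int) :
    pvPosLs x s (d :: ds) =
      if d = x then s :: pvPosLs x (s + 1) ds else pvPosLs x (s + 1) ds := by
  unfold pvPosLs
  rw [PySem.List.enumerate_cons]
  by_cases h : d = x
  · simp [List.filter_cons, h]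
  · simp [List.filter_cons, h]

theorem pv_posLs_ge (x : Int) (ds : List Int) :
    ∀ (s : Int), ∀ p ∈ pvPosLs x s ds, s ≤ p := by
  induction ds with
  | nil => intro s p hp; simp [pvPosLs, PySem.List.enumerate_nil] at hp
  | cons d ds ih =>
    intro s p hp
    rw [pv_posLs_cons] at hp
    by_cases h : d = x
    · rw [if_pos h] at hp
      rcases List.mem_cons.mp hp with rfl | hp
      · omega
      · have := ih (s + 1) p hp; omega
    · rw [if_neg h] at hp
      have := ih (s + 1) p hp; omega

theorem pv_posLs_sorted (x : Int) (ds : List Int) :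
    ∀ (s : Int), (pvPosLs x s ds).Pairwise (· < ·) := by
  induction ds with
  | nil => intro s; simp [pvPosLs, PySem.List.enumerate_nil]
  | cons d ds ih =>
    intro s
    rw [pv_posLs_cons]
    by_cases h : d = x
    · rw [if_pos h]
      exact List.Pairwise.cons
        (fun p hp => by have := pv_posLs_ge x ds (s + 1) p hp; omega) (ih (s + 1))
    · rw [if_neg h]; exact ih (s + 1)

theorem pv_idxFrom (x s : Int) (ds : List Int) :
    ∀ (j : Int), idxFrom x s ds j =
      ((pvPosLs x j ds).filter (fun p => decide (s ≤ p))).head? := by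
  induction ds with
  | nil => intro j; simp [idxFrom, pvPosLs, PySem.List.enumerate_nil]
  | cons d ds ih =>
    intro j
    rw [pv_posLs_cons]
    rw [show idxFrom x s (d :: ds) j =
      (if s ≤ j ∧ d = x then some j else idxFrom x s ds (j + 1)) from rfl]
    by_cases h : d = x
    · rw [if_pos h]
      by_cases hs : s ≤ j
      · rw [if_pos ⟨hs, h⟩, List.filter_cons, if_pos (by simpa using hs)]
        rfl
      · rw [if_neg (fun hh => hs hh.1), List.filter_cons, if_neg (by simpa using hs),
          ih (j + 1)]
    · rw [if_neg (fun hh => h hh.2), if_neg h, ih (j + 1)]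

theorem pv_filter_tail (s : Int) :
    ∀ (l : List Int) (i : Int) (t : List Int), l.Pairwise (· < ·) →
      l.filter (fun p => decide (s ≤ p)) = i :: t →
      t = l.filter (fun p => decide (i + 1 ≤ p)) := by
  intro l
  induction l with
  | nil => intro i t _ h; simp at h
  | cons e l ih =>
    intro i t hsort h
    have he : ∀ p ∈ l, e < p := fun p hp => (List.pairwise_cons.mp hsort).1 p hp
    rw [List.filter_cons] at h
    by_cases hs : s ≤ e
    · rw [if_pos (by simpa using hs)] at h
      injection h with h1 h2
      subst h1
      rw [List.filter_cons, if_neg (by simp), ← h2]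
      have hl1 : l.filter (fun p => decide (s ≤ p)) = l :=
        List.filter_eq_self.mpr (fun p hp => by simp only [decide_eq_true_eq]; have := he p hp; omega)
      have hl2 : l.filter (fun p => decide (e + 1 ≤ p)) = l :=
        List.filter_eq_self.mpr (fun p hp => by simp only [decide_eq_true_eq]; have := he p hp; omega)
      rw [hl1, hl2]
    · rw [if_neg (by simpa using hs)] at h
      have hie : e < i :=
        he i (List.mem_of_mem_filter (by rw [h]; exact List.mem_cons_self ..))
      rw [List.filter_cons, if_neg (by simp only [decide_eq_true_eq]; omega)]
      exact ih i t (List.pairwise_cons.mp hsort).2 h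

theorem pv_psLoop (ds : List Int) (x : Int) :
    ∀ (m : Nat) (s : Int) (ps : List Int),
      psLoop ds x m s ps =
        ps ++ ((pvPosLs x 0 ds).filter (fun p => decide (s ≤ p))).take m := by
  intro m
  induction m with
  | zero => intro s ps; simp [psLoop]
  | succ m ih =>
    intro s ps
    simp only [psLoop]
    rw [pv_idxFrom x s ds 0]
    cases hf : (pvPosLs x 0 ds).filter (fun p => decide (s ≤ p)) with
    | nil => simp
    | cons i t =>
      simp only [List.head?_cons]
      rw [ih (i + 1) (ps ++ [i]),
        ← pv_filter_tail s (pvPosLs x 0 ds) i t (pv_posLs_sorted x ds 0) hf,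
        List.take_succ_cons, List.append_assoc]
      rfl

theorem pv_psLoop_zero (ds : List Int) (x : Int) (m : Nat) :
    psLoop ds x m 0 [] = (pvPosLs x 0 ds).take m := by
  rw [pv_psLoop ds x m 0 []]
  have : (pvPosLs x 0 ds).filter (fun p => decide ((0 : Int) ≤ p)) = pvPosLs x 0 ds :=
    List.filter_eq_self.mpr (fun p hp => by
      have := pv_posLs_ge x ds 0 p hp; simpa using this)
  rw [this]
  rfl

theorem pv_bestLoop (pos : PySem.Dict Int (List Int)) (cs : List (PySem.Dict Int Int))
    (i : Int) (acc : Option (Int × Int)) :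
    bestLoop pos (PySem.List.enumerate cs i) acc =
      pvBest (cs.map (fun q => stepItems pos q.items 0)) i acc := by
  induction cs generalizing i acc with
  | nil => simp [PySem.List.enumerate_nil, bestLoop, pvBest]
  | cons c cs ih =>
    rw [PySem.List.enumerate_cons]
    simp only [bestLoop, List.map_cons, pvBest]
    rw [ih]
    rfl

theorem pvOcc_cons_self_zero (x : Int) (ds : List Int) : pvOcc x 0 (x :: ds) = some 0 := by
  simp [pvOcc]

theorem pvOcc_cons_self_succ (x : Int) (k : Nat) (ds : List Int) :
    pvOcc x (k + 1) (x :: ds) = (pvOcc x k ds).map (· + 1) := by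
  simp [pvOcc]

theorem pvOcc_cons_ne (x d : Int) (k : Nat) (ds : List Int) (h : d ≠ x) :
    pvOcc x k (d :: ds) = (pvOcc x k ds).map (· + 1) := by
  cases k <;> simp [pvOcc, h]

theorem pv_filt_len (x : Int) (ds : List Int) : ∀ s : Int,
    ((PySem.List.enumerate ds s).filter (fun p => p.2 == x)).length = ds.count x := by
  induction ds with
  | nil => intro s; simp [PySem.List.enumerate_nil]
  | cons d ds ih =>
    intro s
    rw [PySem.List.enumerate_cons]
    by_cases h : d = x
    · subst h; simp [List.filter_cons, List.count_cons, ih (s+1)]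
    · have hne : ((x : Int) == d) = false := by simp; exact fun hh => h hh.symm
      simp [List.filter_cons, List.count_cons, h, hne, ih (s+1)]

theorem pv_posLs_len (x : Int) (s : Int) (ds : List Int) :
    (pvPosLs x s ds).length = ds.count x := by
  simp [pvPosLs, pv_filt_len]

theorem pv_filt_get (x : Int) (ds : List Int) : ∀ (s : Int) (k : Nat),
    ((PySem.List.enumerate ds s).filter (fun p => p.2 == x))[k]? =
      (pvOcc x k ds).map (fun n : Nat => ((n : Int) + s, x)) := by
  induction ds with
  | nil => intro s k; simp [PySem.List.enumerate_nil, pvOcc]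
  | cons d ds ih =>
    intro s k
    rw [PySem.List.enumerate_cons]
    by_cases h : d = x
    · subst h
      simp only [List.filter_cons, beq_self_eq_true, if_pos trivial]
      cases k with
      | zero => simp [pvOcc_cons_self_zero]
      | succ k =>
        rw [List.getElem?_cons_succ, ih (s+1) k, pvOcc_cons_self_succ, Option.map_map]
        exact Option.map_congr (fun n _ => by simp; push_cast; ring)
    · simp only [List.filter_cons]
      rw [if_neg (by simp [h]), ih (s+1) k, pvOcc_cons_ne x d k ds h,
        Option.map_map]
      exact Option.map_congr (fun n _ => by simp; push_cast; ring)

theorem pv_posLs_get (x : Int) (s : Int) (ds : List Int) (k : Nat) :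
    (pvPosLs x s ds)[k]? = (pvOcc x k ds).map (fun n : Nat => (n : Int) + s) := by
  unfold pvPosLs
  rw [List.getElem?_map, pv_filt_get x ds s k, Option.map_map]
  rfl

theorem pv_occ_none (x : Int) (k : Nat) (ds : List Int) :
    pvOcc x k ds = none ↔ ds.count x ≤ k := by
  induction ds generalizing k with
  | nil => simp [pvOcc]
  | cons d ds ih =>
    by_cases h : d = x
    · subst h
      cases k with
      | zero => simp [pvOcc, List.count_cons]
      | succ k => simp [pvOcc, List.count_cons, Option.map_eq_none_iff, ih]
    · simp [pvOcc, h, List.count_cons, Ne.symm h, Option.map_eq_none_iff, ih]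

theorem pv_occ_lt (x : Int) (k : Nat) (ds : List Int) (n : Nat) (h : pvOcc x k ds = some n) :
    n < ds.length := by
  induction ds generalizing k n with
  | nil => simp [pvOcc] at h
  | cons d ds ih =>
    simp only [pvOcc] at h
    by_cases hd : d = x
    · rw [if_pos hd] at h
      cases k with
      | zero => injection h with h; subst h; simp
      | succ k =>
        rcases Option.map_eq_some_iff.mp h with ⟨m, hm, rfl⟩
        have := ih k m hm
        simp only [List.length_cons]; omega
    · rw [if_neg hd] at h
      rcases Option.map_eq_some_iff.mp h with ⟨m, hm, rfl⟩
      have := ih k m hm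
      simp only [List.length_cons]; omega

theorem pv_occ_count (x : Int) (k : Nat) (ds : List Int) (n : Nat)
    (h : pvOcc x k ds = some n) :
    ∀ t : Nat, (k + 1 ≤ (ds.take t).count x ↔ n < t) := by
  induction ds generalizing k n with
  | nil => simp [pvOcc] at h
  | cons d ds ih =>
    intro t
    cases t with
    | zero => simp
    | succ t =>
      simp only [pvOcc] at h
      rw [List.take_succ_cons, List.count_cons]
      by_cases hd : d = x
      · rw [if_pos hd] at h
        cases k with
        | zero =>
          injection h with h; subst h
          simp [hd, Nat.lt_succ_iff]
        | succ k =>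
          rcases Option.map_eq_some_iff.mp h with ⟨m, hm, rfl⟩
          have := ih k m hm t
          simp only [hd, beq_self_eq_true, if_pos trivial]
          omega
      · rw [if_neg hd] at h
        rcases Option.map_eq_some_iff.mp h with ⟨m, hm, rfl⟩
        have := ih k m hm t
        rw [if_neg (by simp; exact fun hh => hd hh)]
        omega

theorem pv_resid_count (pref c : List Int) (x : Int) :
    (pvResid pref c).count x = c.count x - pref.count x := by
  induction pref generalizing c with
  | nil => simp [pvResid]
  | cons p pref ih =>
    simp only [pvResid, List.foldl_cons]
    rw [show (pref.foldl (fun l x => l.erase x) (c.erase p)) = pvResid pref (c.erase p) from rfl,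
      ih, List.count_erase]
    by_cases h : p = x
    · subst h; simp [List.count_cons]; omega
    · rw [if_neg (by simp; exact fun hh => h hh), List.count_cons,
        if_neg (by simp; exact fun hh => h hh)]
      omega

theorem pv_resid_sublist (pref c : List Int) : (pvResid pref c).Sublist c := by
  induction pref generalizing c with
  | nil => simp [pvResid]
  | cons p pref ih =>
    simp only [pvResid, List.foldl_cons]
    exact (ih (c.erase p)).trans (List.erase_sublist ..)

theorem pv_resid_empty_iff (pref c : List Int) :
    pvResid pref c = [] ↔ ∀ x ∈ c, c.count x ≤ pref.count x := by
  constructor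
  · intro h x hx
    have := pv_resid_count pref c x
    rw [h] at this
    simp at this
    omega
  · intro h
    by_contra hne
    rcases List.exists_mem_of_ne_nil _ hne with ⟨x, hx⟩
    have hxc : x ∈ c := (pv_resid_sublist pref c).mem hx
    have hcnt := pv_resid_count pref c x
    have hpos : 0 < (pvResid pref c).count x := List.count_pos_iff.mpr hx
    have := h x hxc
    omega

theorem pv_stepItems_char (pos : PySem.Dict Int (List Int)) (items : List (Int × Int))
    (s : Int) :
    stepItems pos items s =
      if ∀ p ∈ items, p.2 ≤ ((pos.getD p.1 []).length : Int)
      then some (items.foldl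
        (fun s p => max s (PySem.List.pyGetD (pos.getD p.1 []) (p.2 - 1) 0)) s)
      else none := by
  induction items generalizing s with
  | nil => simp [stepItems]
  | cons p rest ih =>
    obtain ⟨x, m⟩ := p
    by_cases hp : m ≤ (((pos.getD x []).length : Nat) : Int)
    · rw [show stepItems pos ((x, m) :: rest) s =
        stepItems pos rest (max s (PySem.List.pyGetD (pos.getD x []) (m - 1) 0)) by
          simp only [stepItems]; rw [if_neg (by omega)]]
      rw [ih]
      by_cases hall : ∀ p ∈ rest, p.2 ≤ ((pos.getD p.1 []).length : Int)
      · rw [if_pos hall, if_pos (by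
          intro q hq
          rcases List.mem_cons.mp hq with rfl | hq
          · exact hp
          · exact hall q hq)]
        rfl
      · rw [if_neg hall, if_neg (by
          intro hc; exact hall (fun q hq => hc q (List.mem_cons_of_mem _ hq)))]
    · rw [show stepItems pos ((x, m) :: rest) s = none by
        simp only [stepItems]; rw [if_pos (by omega)]]
      rw [if_neg (by intro hc; exact hp (hc (x, m) (by simp)))]

theorem pv_foldl_max {α : Type} (l : List α) (f : α → Int) (s : Int) :
    (s ≤ l.foldl (fun t a => max t (f a)) s) ∧
    (∀ a ∈ l, f a ≤ l.foldl (fun t a => max t (f a)) s) ∧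
    (l.foldl (fun t a => max t (f a)) s = s ∨
      ∃ a ∈ l, l.foldl (fun t a => max t (f a)) s = f a) := by
  induction l generalizing s with
  | nil => simp
  | cons a l ih =>
    obtain ⟨h1, h2, h3⟩ := ih (max s (f a))
    refine ⟨le_trans (le_max_left _ _) h1, ?_, ?_⟩
    · intro b hb
      rcases List.mem_cons.mp hb with rfl | hb
      · exact le_trans (le_max_right _ _) h1
      · exact h2 b hb
    · rcases h3 with h3 | ⟨b, hb, h3⟩
      · simp only [List.foldl_cons]
        rcases max_choice s (f a) with hm | hm
        · rw [h3, hm]; left; rfl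
        · rw [h3, hm]; right; exact ⟨a, by simp, rfl⟩
      · right; exact ⟨b, List.mem_cons_of_mem _ hb, by simpa using h3⟩

theorem pv_percard (listki : List (List Int)) (c ds : List Int) (hc : c ∈ listki)
    (hds : ds ≠ []) :
    stepItems (posDict (pvNeed listki) ds) (cntOf c).items 0 = pvSfind c ds := by
  rw [pv_cntOf_items, pv_stepItems_char]
  have hbound : ∀ x ∈ c, (c.count x : Int) ≤ pvNeedVal listki x := by
    intro x hx
    exact (pv_foldl_max listki (fun c' => (c'.count x : Int)) 0).2.1 c hc
  have hkey : ∀ x ∈ c, (posDict (pvNeed listki) ds).getD x [] =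
      (pvPosLs x 0 ds).take (pvNeedVal listki x).toNat := by
    intro x hx
    have h1 : (1 : Int) ≤ (c.count x : Int) := by
      have := List.count_pos_iff.mpr hx; omega
    have hxk : x ∈ (pvNeed listki).keys := by
      by_contra hnk
      have hcon : (pvNeed listki).contains x = false := by
        cases hco : (pvNeed listki).contains x with
        | false => rfl
        | true => exact absurd ((PySem.Dict.contains_iff_mem_keys (pvNeed listki) x).mp hco) hnk
      have := PySem.Dict.getD_of_not_contains (pvNeed listki) (k := x) 0 hcon
      rw [pv_need_getD] at this
      have := hbound x hx
      omega
    rw [pv_posDict_getD _ _ _ (pv_need_nodup listki) hxk, pv_need_getD, pv_psLoop_zero]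
  have hlen : ∀ x ∈ c, ((posDict (pvNeed listki) ds).getD x []).length =
      min (pvNeedVal listki x).toNat (ds.count x) := by
    intro x hx
    rw [hkey x hx, List.length_take, pv_posLs_len]
  by_cases hok : ∀ x ∈ c, c.count x ≤ ds.count x
  · -- every needed number is drawn often enough
    rw [if_pos (by
      intro p hp
      rcases List.mem_map.mp hp with ⟨x, hx, rfl⟩
      have hxc : x ∈ c := (PySem.Set.mem_ofList c x).mp hx
      simp only [hlen x hxc]
      have h1 := hbound x hxc
      have h2 := hok x hxc
      omega)]
    -- the value folded for x is the index of its (count x)-th occurrence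
    have hval : ∀ x ∈ c, ∃ n : Nat, pvOcc x (c.count x - 1) ds = some n ∧
        PySem.List.pyGetD ((posDict (pvNeed listki) ds).getD x [])
          ((c.count x : Int) - 1) 0 = (n : Int) := by
      intro x hxc
      have hm1 : 1 ≤ c.count x := List.count_pos_iff.mpr hxc
      have hocc : pvOcc x (c.count x - 1) ds ≠ none := by
        rw [Ne, pv_occ_none]
        have := hok x hxc; omega
      obtain ⟨n, hn⟩ := Option.ne_none_iff_exists'.mp hocc
      refine ⟨n, hn, ?_⟩
      have hcast : (c.count x : Int) - 1 = ((c.count x - 1 : Nat) : Int) := by omega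
      have hlt : c.count x - 1 < (pvNeedVal listki x).toNat := by
        have := hbound x hxc; omega
      rw [hkey x hxc, hcast, PySem.List.pyGetD_natCast, List.getD_eq_getElem?_getD,
        List.getElem?_take, if_pos hlt, pv_posLs_get, hn]
      simp
    -- fold over the distinct elements
    set S := PySem.Set.ofList c with hS
    have hfold : (S.map (fun k => (k, (c.count k : Int)))).foldl
        (fun s p => max s
          (PySem.List.pyGetD ((posDict (pvNeed listki) ds).getD p.1 []) (p.2 - 1) 0)) 0 =
        S.foldl (fun t x => max t
          (PySem.List.pyGetD ((posDict (pvNeed listki) ds).getD x [])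
            ((c.count x : Int) - 1) 0)) 0 := by
      rw [List.foldl_map]
    rw [hfold]
    set f : Int → Int := fun x =>
      PySem.List.pyGetD ((posDict (pvNeed listki) ds).getD x [])
        ((c.count x : Int) - 1) 0 with hf
    obtain ⟨hge0, hub, hat⟩ := pv_foldl_max S f 0
    set M : Int := S.foldl (fun t x => max t (f x)) 0 with hM
    have hmemS : ∀ x, x ∈ S ↔ x ∈ c := fun x => PySem.Set.mem_ofList c x
    -- M is a natural number
    have hMnat : M = ((M.toNat : Nat) : Int) := by omega
    -- the predicate of pvSfind holds exactly from M on
    have hptrue : (pvResid (ds.take (M.toNat + 1)) c).isEmpty = true := by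
      rw [List.isEmpty_iff, pv_resid_empty_iff]
      intro x hxc
      obtain ⟨n, hn, hv⟩ := hval x hxc
      have hub' : (n : Int) ≤ M := le_of_eq_of_le hv.symm (hub x ((hmemS x).mpr hxc))
      have hnM : n < M.toNat + 1 := by omega
      have := (pv_occ_count x (c.count x - 1) ds n hn (M.toNat + 1)).mpr hnM
      have hm1 : 1 ≤ c.count x := List.count_pos_iff.mpr hxc
      omega
    have hpfalse : ∀ j : Nat, j < M.toNat →
        (pvResid (ds.take (j + 1)) c).isEmpty = false := by
      intro j hj
      rcases hat with hat | ⟨x, hxS, hat⟩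
      · omega
      · have hxc : x ∈ c := (hmemS x).mp hxS
        obtain ⟨n, hn, hv⟩ := hval x hxc
        have hnM : (n : Int) = M := by rw [hat]; exact hv.symm
        rw [← Bool.not_eq_true, List.isEmpty_iff]
        intro hemp
        have hcount := (pv_resid_empty_iff _ _).mp hemp x hxc
        have hm1 : 1 ≤ c.count x := List.count_pos_iff.mpr hxc
        have := (pv_occ_count x (c.count x - 1) ds n hn (j + 1)).mp (by omega)
        omega
    have hMlt : M.toNat < ds.length := by
      rcases hat with hat | ⟨x, hxS, hat⟩
      · have : M = 0 := hat
        have : ds.length ≠ 0 := fun h => hds (List.length_eq_zero_iff.mp h)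
        omega
      · obtain ⟨n, hn, hv⟩ := hval x ((hmemS x).mp hxS)
        have := pv_occ_lt x (c.count x - 1) ds n hn
        have hnM : (n : Int) = M := by rw [hat]; exact hv.symm
        omega
    unfold pvSfind
    rw [(List.find?_eq_some_iff_getElem
      (p := fun k => (pvResid (List.take (k + 1) ds) c).isEmpty)).mpr
      ⟨hptrue, M.toNat, by simpa using hMlt, by
      simp [List.getElem_range], by
      intro j hj
      rw [List.getElem_range]
      simp [hpfalse j (by simpa using hj)]⟩]
    simp [hMnat.symm]
  · -- some needed number is never drawn often enough: both sides are none
    rw [if_neg (by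
      intro hcn
      apply hok
      intro x hxc
      have := hcn (x, (c.count x : Int)) (List.mem_map.mpr
        ⟨x, (PySem.Set.mem_ofList c x).mpr hxc, rfl⟩)
      simp only [hlen x hxc] at this
      have := hbound x hxc
      omega)]
    push_neg at hok
    obtain ⟨x, hxc, hlt⟩ := hok
    unfold pvSfind
    rw [List.find?_eq_none.mpr (by
      intro k _
      rw [Bool.not_eq_true, ← Bool.not_eq_true, List.isEmpty_iff]
      intro hemp
      have := (pv_resid_empty_iff _ _).mp hemp x hxc
      have hle := List.Sublist.count_le x (List.take_sublist (k + 1) ds)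
      omega)]
    rfl

-- ===== VERDICT (by name: the statement is the Claim_ definition above) =====
theorem bingo_spec : Claim_equal_bingo := by
  intro listki ds _ hpre
  unfold Spec_bingo
  show bingo listki ds = bingo_alt listki ds
  unfold bingo bingo_alt
  simp only [List.map_id', pv_cntsNeed]
  rw [pv_ML, pv_bestLoop, List.map_map,
    List.map_congr_left (fun c (hc : c ∈ listki) =>
      show ((fun q => stepItems (posDict (pvNeed listki) ds) q.items 0) ∘ cntOf) c =
        pvSfind c ds from pv_percard listki c ds hc hpre.1)]
  cases hb : pvBest (listki.map (fun c => pvSfind c ds)) 0 none with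
  | none => simp [hb]
  | some q => simp [hb]
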